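-- pv_equiv track=rewrite | github.com/mateusb12/queryProcessor | queries/relational_algebra_execution_order.py | __raw_order
-- ===== SOURCE A (Python) =====
-- def __raw_order(input_string: str) -> list[str]:
--     """This function splits instructions by parenthesis and order then by executing the most inner ones first"""
--     parenthesis_pot = []
--     instruction_dict = {}
--     for character in input_string:
--         if character == "(":
--             parenthesis_pot.append(True)
--         elif character == ")":
--             parenthesis_pot.pop()
--         else:
--             location = len(parenthesis_pot)
--             if location not in instruction_dict:
--                 instruction_dict[location] = []
--             instruction_dict[location].append(character)
--     for key, value in instruction_dict.items():
--         instruction_dict[key] = "".join(value)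
--     return [value for key, value in sorted(instruction_dict.items(), key=lambda item: item[0])]
-- ===== SOURCE B (Python) =====
-- def __raw_order(input_string: str) -> list[str]:
--     depth = 0
--     pairs = []
--     for ch in input_string:
--         if ch == "(":
--             depth += 1
--         elif ch == ")":
--             depth -= 1
--         else:
--             pairs.append((depth, ch))
--     if not pairs:
--         return []
--     depths = [d for d, _ in pairs]
--     lo, hi = min(depths), max(depths)
--     result = []
--     for d in range(lo, hi + 1):
--         chunk = "".join(ch for dd, ch in pairs if dd == d)
--         if chunk:
--             result.append(chunk)
--     return result
-- ===== Notes on version B (the rewrite author's own statement) =====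
-- stated objective: alternative
-- what changed: B replaces A's boolean stack and dict-of-lists bucketing with an integer depth counter collecting flat (depth, char) pairs in one pass, then emits each depth group by scanning the pairs once per depth value of [min, max], so the dict and the sort of its items disappear.
import Mathlib
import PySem

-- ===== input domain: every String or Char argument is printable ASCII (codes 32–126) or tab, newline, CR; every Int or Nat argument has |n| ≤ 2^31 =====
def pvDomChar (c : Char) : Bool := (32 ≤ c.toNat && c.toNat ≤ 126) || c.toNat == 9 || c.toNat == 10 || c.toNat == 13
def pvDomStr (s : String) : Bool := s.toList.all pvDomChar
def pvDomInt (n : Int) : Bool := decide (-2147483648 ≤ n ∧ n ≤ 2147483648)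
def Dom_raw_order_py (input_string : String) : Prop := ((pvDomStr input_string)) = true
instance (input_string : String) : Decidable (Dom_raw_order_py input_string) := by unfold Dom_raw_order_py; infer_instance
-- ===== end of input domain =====

-- B groups characters by parenthesis depth without a dict: one pass collecting (depth, char)
-- pairs with an integer depth counter, then one scan per depth value of the range [min, max].
-- Return-value equivalence only; neither program mutates its argument.

-- ===== PORT A =====
-- one loop step of A: a True-stack plus a dict grouping chars by stack height;
-- `none` = the IndexError of parenthesis_pot.pop() on an empty stack
def rawStepA (st : Option (List Bool × PySem.Dict Int (List Char))) (c : Char) :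
    Option (List Bool × PySem.Dict Int (List Char)) :=
  match st with
  | none => none
  | some (pot, d) =>
    if c = '(' then some (pot ++ [true], d)
    else if c = ')' then
      match PySem.List.pop? pot with
      | none => none
      | some (_, rest) => some (rest, d)
    else
      -- location = len(pot); if location not in dict: dict[location] = []; dict[location].append(c)
      some (pot, d.modify (pot.length : Int) [] (· ++ [c]))

def raw_order_py (input_string : String) : List String :=
  match input_string.toList.foldl rawStepA (some ([], PySem.Dict.empty)) with
  | none => []   -- Python raised IndexError here; excluded by Pre_
  | some (_, d) =>
    -- for key, value in d.items(): d[key] = "".join(value)  — the value type changes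
    -- list→str, so the in-place rewrite is ported as rebuilding the dict in item order
    let d2 := d.items.foldl (fun dd p => dd.insert p.1 (String.ofList p.2)) PySem.Dict.empty
    (PySem.List.sorted d2.items (fun p => p.1)).map (fun p => p.2)

-- ===== PORT B =====
-- one loop step of B: integer depth counter and a flat list of (depth, char) pairs
def rawStepB (st : Int × List (Int × Char)) (c : Char) : Int × List (Int × Char) :=
  if c = '(' then (st.1 + 1, st.2)
  else if c = ')' then (st.1 - 1, st.2)
  else (st.1, st.2 ++ [(st.1, c)])

def raw_order_py_alt (input_string : String) : List String :=
  let pairs := (input_string.toList.foldl rawStepB (0, [])).2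
  if pairs = [] then []
  else
    match PySem.List.min? (pairs.map (fun p => p.1)) (fun x => x),
          PySem.List.max? (pairs.map (fun p => p.1)) (fun x => x) with
    | some lo, some hi =>
        (PySem.List.pyRange lo (hi + 1) 1).foldl
          (fun acc dd =>
            let chunk := (pairs.filter (fun p => p.1 == dd)).map (fun p => p.2)
            if chunk = [] then acc else acc ++ [String.ofList chunk]) []
    | _, _ => []   -- unreachable: pairs ≠ []

-- ===== PRECONDITION & SPEC =====
-- Pre_ excludes exactly the inputs on which A raises IndexError (a ')' with no matching
-- '(' before it, i.e. some prefix holds more ')' than '('); A returns on everything else.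
def Pre_raw_order_py (input_string : String) : Prop :=
  ∀ n ≤ input_string.toList.length,
    (input_string.toList.take n).count ')' ≤ (input_string.toList.take n).count '('

instance (input_string : String) : Decidable (Pre_raw_order_py input_string) := by
  unfold Pre_raw_order_py; infer_instance

def pvWitness_raw_order_py : String := "se(le(aa)bb)cc"

def Spec_raw_order_py (input_string : String) (out : List String) : Prop :=
  out = raw_order_py_alt input_string
instance (input_string : String) (out : List String) : Decidable (Spec_raw_order_py input_string out) := by
  unfold Spec_raw_order_py; infer_instance

-- ===== CLAIM (what is proved, stated in full; the proofs are below) =====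
def Claim_equal_raw_order_py : Prop :=
  ∀ (input_string : String), Dom_raw_order_py input_string →
    Pre_raw_order_py input_string →
    Spec_raw_order_py input_string (raw_order_py input_string)

-- ===== LEMMAS AND PROOFS =====

-- the (depth, char) pairs of the non-parenthesis characters, starting at depth `dep`
def pvPairs : List Char → Int → List (Int × Char)
  | [], _ => []
  | c :: cs, dep =>
    if c = '(' then pvPairs cs (dep + 1)
    else if c = ')' then pvPairs cs (dep - 1)
    else (dep, c) :: pvPairs cs dep

-- A's stack never underflows when started at height k
def pvOk : List Char → Nat → Bool
  | [], _ => true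
  | c :: cs, k =>
    if c = '(' then pvOk cs (k + 1)
    else if c = ')' then (match k with | 0 => false | m + 1 => pvOk cs m)
    else pvOk cs k

lemma pvOk_of_counts (cs : List Char) : ∀ (k : Nat),
    (∀ n, (cs.take n).count ')' ≤ k + (cs.take n).count '(') → pvOk cs k = true := by
  induction cs with
  | nil => intro k _; rfl
  | cons c cs ih =>
    intro k h
    by_cases hc : c = '('
    · simp only [pvOk, hc]
      apply ih
      intro n
      have := h (n + 1)
      simp [hc] at this
      omega
    · by_cases hc2 : c = ')'
      · have h1 := h 1
        simp [hc2] at h1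
        obtain ⟨m, rfl⟩ : ∃ m, k = m + 1 := ⟨k - 1, by omega⟩
        simp only [pvOk, if_neg hc, hc2]
        apply ih
        intro n
        have := h (n + 1)
        simp [hc2] at this
        omega
      · simp only [pvOk, if_neg hc, if_neg hc2]
        apply ih
        intro n
        have := h (n + 1)
        simp [hc, hc2] at this
        omega

lemma foldB_eq (cs : List Char) : ∀ (dep : Int) (acc : List (Int × Char)),
    ∃ depF, cs.foldl rawStepB (dep, acc) = (depF, acc ++ pvPairs cs dep) := by
  induction cs with
  | nil => intro dep acc; exact ⟨dep, by simp [pvPairs]⟩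
  | cons c cs ih =>
    intro dep acc
    by_cases hc : c = '('
    · obtain ⟨dF, hF⟩ := ih (dep + 1) acc
      exact ⟨dF, by simpa [rawStepB, pvPairs, hc] using hF⟩
    · by_cases hc2 : c = ')'
      · obtain ⟨dF, hF⟩ := ih (dep - 1) acc
        exact ⟨dF, by simpa [rawStepB, pvPairs, hc, hc2] using hF⟩
      · obtain ⟨dF, hF⟩ := ih dep (acc ++ [(dep, c)])
        exact ⟨dF, by simpa [rawStepB, pvPairs, hc, hc2] using hF⟩

lemma foldA_eq (cs : List Char) : ∀ (pot : List Bool) (d : PySem.Dict Int (List Char)),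
    pvOk cs pot.length = true →
    ∃ potF, cs.foldl rawStepA (some (pot, d)) =
      some (potF, (pvPairs cs (pot.length : Int)).foldl
        (fun dd p => dd.modify p.1 [] (· ++ [p.2])) d) := by
  induction cs with
  | nil => intro pot d _; exact ⟨pot, by simp [pvPairs]⟩
  | cons c cs ih =>
    intro pot d hok
    by_cases hc : c = '('
    · simp only [pvOk, hc] at hok
      obtain ⟨potF, hF⟩ := ih (pot ++ [true]) d (by simpa using hok)
      refine ⟨potF, ?_⟩
      have hstep : rawStepA (some (pot, d)) c = some (pot ++ [true], d) := by
        simp [rawStepA, hc]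
      simp only [List.foldl_cons, hstep]
      rw [hF]
      have hlen : ((pot ++ [true]).length : Int) = (pot.length : Int) + 1 := by simp
      rw [hlen]
      simp [pvPairs, hc]
    · by_cases hc2 : c = ')'
      · simp only [pvOk, if_neg hc, hc2] at hok
        match hpot : pot with
        | [] => simp [hpot] at hok
        | b :: bs =>
          have hne : (b :: bs : List Bool) ≠ [] := by simp
          have hdecomp := (List.dropLast_append_getLast hne)
          obtain ⟨potF, hF⟩ := ih (b :: bs).dropLast d (by
            have hlen : (b :: bs).dropLast.length = bs.length := by simp
            rw [hlen]
            simpa using hok)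
          refine ⟨potF, ?_⟩
          have hpop : PySem.List.pop? (b :: bs) = some ((b :: bs).getLast hne, (b :: bs).dropLast) := by
            conv_lhs => rw [← hdecomp]
            rw [PySem.List.pop?_last]
          have hstep : rawStepA (some ((b : Bool) :: bs, d)) c = some ((b :: bs).dropLast, d) := by
            simp [rawStepA, hc, hc2, hpop]
          simp only [List.foldl_cons, hstep]
          rw [hF]
          have hlen : ((b :: bs).dropLast.length : Int) = (((b :: bs).length : Nat) : Int) - 1 := by
            simp
          rw [hlen]
          simp [pvPairs, hc, hc2]
      · simp only [pvOk, if_neg hc, if_neg hc2] at hok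
        obtain ⟨potF, hF⟩ := ih pot (d.modify (pot.length : Int) [] (· ++ [c])) hok
        refine ⟨potF, ?_⟩
        have hstep : rawStepA (some (pot, d)) c =
            some (pot, d.modify (pot.length : Int) [] (· ++ [c])) := by
          simp [rawStepA, hc, hc2]
        simp only [List.foldl_cons, hstep]
        rw [hF]
        simp [pvPairs, hc, hc2]

-- the characters of P lying at depth k, in order
def pvChars (P : List (Int × Char)) (k : Int) : List Char :=
  (P.filter (fun p => p.1 == k)).map (fun p => p.2)

-- a non-parenthesis character exists at depth x iff x is among the pair keys
lemma pvChars_ne_nil_iff (P : List (Int × Char)) (x : Int) :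
    pvChars P x ≠ [] ↔ x ∈ P.map Prod.fst := by
  unfold pvChars
  rw [Ne, List.map_eq_nil_iff, List.filter_eq_nil_iff]
  simp only [beq_iff_eq, List.mem_map, not_forall]
  constructor
  · rintro ⟨p, hp, h⟩
    exact ⟨p, hp, by simpa using h⟩
  · rintro ⟨p, hp, h⟩
    exact ⟨p, hp, by simpa using h⟩

-- the whole A-side pipeline, written over the pair list
lemma raw_order_eq_pipeline (s : String) (hpre : Pre_raw_order_py s) :
    raw_order_py s =
      (PySem.List.sorted ((PySem.Set.ofList ((pvPairs s.toList 0).map Prod.fst)).map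
          (fun k => (k, String.ofList (pvChars (pvPairs s.toList 0) k))))
        (fun p => p.1)).map (fun p => p.2) := by
  have hcount : ∀ n, (s.toList.take n).count ')' ≤ 0 + (s.toList.take n).count '(' := by
    intro n
    by_cases h : n ≤ s.toList.length
    · simpa using hpre n h
    · rw [List.take_of_length_le (by omega)]
      have := hpre s.toList.length le_rfl
      rw [List.take_length] at this
      omega
  have hok : pvOk s.toList 0 = true := pvOk_of_counts s.toList 0 hcount
  obtain ⟨potF, hA⟩ := foldA_eq s.toList [] PySem.Dict.empty (by simpa using hok)
  simp only [List.length_nil, Nat.cast_zero] at hA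
  set P := pvPairs s.toList 0 with hP
  set D := P.foldl (fun dd p => dd.modify p.1 [] (· ++ [p.2])) PySem.Dict.empty with hD
  have hKnodup : D.keys.Nodup := by
    rw [hD]
    exact PySem.Dict.nodup_keys_foldl_modify_key P Prod.fst []
      (fun _ p => (· ++ [p.2])) PySem.Dict.empty (by simp [PySem.Dict.keys_empty])
  have hkeys : D.keys = PySem.Set.ofList (P.map Prod.fst) := by
    rw [hD]
    rw [PySem.Dict.keys_foldl_modify_key P Prod.fst [] (fun _ p => (· ++ [p.2])) PySem.Dict.empty]
    rw [PySem.Dict.keys_empty, PySem.Set.update_nil_left]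
  have hgetD : ∀ k, D.getD k [] = pvChars P k := by
    intro k
    rw [hD, PySem.Dict.getD_foldl_modify_append, PySem.Dict.getD_empty]
    rfl
  have hitems : D.items = D.keys.map (fun k => (k, D.getD k [])) :=
    PySem.Dict.items_eq_map_keys D hKnodup []
  have hfresh : (D.items.foldl (fun dd p => dd.insert p.1 (String.ofList p.2)) PySem.Dict.empty).items
      = D.items.map (fun p => (p.1, String.ofList p.2)) := by
    have := PySem.Dict.items_foldl_insert_fresh D.items Prod.fst
      (fun p => String.ofList p.2) PySem.Dict.empty
      (fun a _ => PySem.Dict.contains_empty a.1) hKnodup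
    simpa using this
  unfold raw_order_py
  rw [hA]
  simp only []
  rw [hfresh, hitems, List.map_map, hkeys]
  have hfe : ((fun p => (p.1, String.ofList p.2)) ∘ (fun k => (k, D.getD k [])))
      = (fun k => (k, String.ofList (pvChars P k))) := by
    funext k
    simp [hgetD k]
  rw [hfe]

-- B's inner loop, as a filter of the depth range
lemma pvFoldl_chunk (P : List (Int × Char)) (R : List Int) :
    R.foldl (fun acc dd =>
      if pvChars P dd = [] then acc else acc ++ [String.ofList (pvChars P dd)]) []
    = (R.filter (fun dd => decide (pvChars P dd ≠ []))).map
        (fun dd => String.ofList (pvChars P dd)) := by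
  rw [PySem.List.foldl_congr_mem R _
    (fun acc dd => if pvChars P dd ≠ [] then acc ++ [String.ofList (pvChars P dd)] else acc) []
    (by
      intro acc x _
      by_cases h : pvChars P x = [] <;> simp [h])]
  rw [PySem.List.foldl_append_ite]
  simp

-- the sorted dict items ARE the nonempty depth groups of [lo, hi] in depth order
lemma pvSorted_eq_filter_range (P : List (Int × Char)) (lo hi : Int)
    (hmin : PySem.List.min? (P.map Prod.fst) (fun x => x) = some lo)
    (hmax : PySem.List.max? (P.map Prod.fst) (fun x => x) = some hi) :
    PySem.List.sorted ((PySem.Set.ofList (P.map Prod.fst)).map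
        (fun k => (k, String.ofList (pvChars P k)))) (fun p => p.1)
    = ((PySem.List.pyRange lo (hi + 1) 1).filter (fun dd => decide (pvChars P dd ≠ []))).map
        (fun k => (k, String.ofList (pvChars P k))) := by
  apply PySem.List.sorted_eq_of_perm_of_pairwise_lt
  · apply List.Perm.map
    rw [List.perm_ext_iff_of_nodup
      ((PySem.List.nodup_pyRange_one lo (hi + 1)).filter _)
      (PySem.Set.nodup_ofList (P.map Prod.fst))]
    intro x
    rw [List.mem_filter, PySem.Set.mem_ofList]
    simp only [PySem.List.mem_pyRange_one, decide_eq_true_eq, pvChars_ne_nil_iff]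
    constructor
    · rintro ⟨_, hx⟩; exact hx
    · intro hx
      refine ⟨⟨PySem.List.min?_isMin hmin x hx, ?_⟩, hx⟩
      have := PySem.List.max?_isMax hmax x hx
      omega
  · rw [List.pairwise_map]
    exact List.Pairwise.sublist (List.filter_sublist)
      (PySem.List.pairwise_lt_pyRange_one lo (hi + 1))

-- ===== VERDICT (by name: the statement is the Claim_ definition above) =====
theorem raw_order_py_spec : Claim_equal_raw_order_py := by
  intro s _ hpre
  unfold Spec_raw_order_py
  rw [raw_order_eq_pipeline s hpre]
  obtain ⟨depF, hB⟩ := foldB_eq s.toList 0 []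
  set P := pvPairs s.toList 0 with hPdef
  by_cases hPnil : P = []
  · unfold raw_order_py_alt
    rw [hB]
    simp [hPnil, PySem.Set.ofList, PySem.List.sorted]
  · have hmapne : P.map Prod.fst ≠ [] := by simpa using hPnil
    obtain ⟨lo, hmin⟩ : ∃ lo, PySem.List.min? (P.map Prod.fst) (fun x => x) = some lo := by
      cases hm : PySem.List.min? (P.map Prod.fst) (fun x => x) with
      | none => exact absurd ((PySem.List.min?_eq_none_iff _ _).mp hm) hmapne
      | some lo => exact ⟨lo, rfl⟩
    obtain ⟨hi, hmax⟩ : ∃ hi, PySem.List.max? (P.map Prod.fst) (fun x => x) = some hi := by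
      cases hm : PySem.List.max? (P.map Prod.fst) (fun x => x) with
      | none => exact absurd ((PySem.List.max?_eq_none_iff _ _).mp hm) hmapne
      | some hi => exact ⟨hi, rfl⟩
    have hrhs : raw_order_py_alt s = (PySem.List.pyRange lo (hi + 1) 1).foldl
        (fun acc dd => if pvChars P dd = [] then acc
          else acc ++ [String.ofList (pvChars P dd)]) [] := by
      unfold raw_order_py_alt
      rw [hB]
      simp only [List.nil_append, if_neg hPnil, hmin, hmax]
      rfl
    rw [pvSorted_eq_filter_range P lo hi hmin hmax, hrhs, pvFoldl_chunk, List.map_map]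
    rfl
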